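-- pv_equiv track=rewrite | github.com/PlusLabNLP/zero_shot_cqa | code/rule_based_transform.py | process_nowh
-- ===== SOURCE A (Python) =====
-- wh_pos = ['WDT', 'WP',  'WP$', 'WRB']
--
-- def process_nowh(tokens, pos_tags):
--     new_tokens = []
--     cnt = 0
--     for t, pos in zip(tokens[::-1], pos_tags[::-1]):
--         if not pos in wh_pos or cnt > 0:
--             if t != '?':
--                 new_tokens.append(t)
--         else:
--             new_tokens.append('[MASK]')
--             cnt += 1
--     new_tokens = new_tokens[::-1]
--     if cnt == 0:
--         new_tokens.append('[MASK]')
--     return ' '.join(new_tokens)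
-- ===== SOURCE B (Python) =====
-- wh_pos = ['WDT', 'WP',  'WP$', 'WRB']
--
-- def process_nowh(tokens, pos_tags):
--     # tail-align tokens with pos_tags (zip-of-reversed semantics)
--     n = min(len(tokens), len(pos_tags))
--     toks = tokens[len(tokens) - n:]
--     poss = pos_tags[len(pos_tags) - n:]
--     # index of the rightmost wh-word, if any
--     wh_idx = None
--     i = 0
--     for p in poss:
--         if p in wh_pos:
--             wh_idx = i
--         i += 1
--     if wh_idx is None:
--         return ' '.join([t for t in toks if t != '?'] + ['[MASK]'])
--     return ' '.join([t for t in toks[:wh_idx] if t != '?'] + ['[MASK]']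
--                     + [t for t in toks[wh_idx + 1:] if t != '?'])
-- ===== Notes on version B (the rewrite author's own statement) =====
-- stated objective: alternative
-- what changed: A does one backward pass over zip(reversed lists) threading a mask counter through the fold and reverses at the end; B first tail-aligns the two lists by slicing, locates the rightmost wh index in a single forward scan, then assembles the result by filtering the slices before and after that index (no counter, no reversal).
import Mathlib
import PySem

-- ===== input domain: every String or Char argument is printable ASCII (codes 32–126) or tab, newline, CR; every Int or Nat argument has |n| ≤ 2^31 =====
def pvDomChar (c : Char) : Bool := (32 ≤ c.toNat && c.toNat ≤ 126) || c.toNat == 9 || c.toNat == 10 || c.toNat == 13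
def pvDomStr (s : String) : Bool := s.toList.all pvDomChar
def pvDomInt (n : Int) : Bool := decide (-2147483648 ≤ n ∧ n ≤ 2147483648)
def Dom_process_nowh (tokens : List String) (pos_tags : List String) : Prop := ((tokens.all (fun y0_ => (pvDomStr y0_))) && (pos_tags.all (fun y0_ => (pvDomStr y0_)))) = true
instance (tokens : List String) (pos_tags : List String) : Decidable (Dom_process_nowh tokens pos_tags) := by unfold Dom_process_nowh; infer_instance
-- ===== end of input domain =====

-- B replaces A's single backward pass with a counter by a different decomposition:
-- tail-align the lists, locate the rightmost wh index in one scan, then build the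
-- output by slicing/filtering around it (same return value; objective: alternative).

def whList : List String := ["WDT", "WP", "WP$", "WRB"]

-- ===== PORT A =====
def process_nowh (tokens : List String) (pos_tags : List String) : String :=
  let st := (tokens.reverse.zip pos_tags.reverse).foldl
      (fun (s : List String × Int) tp =>
        if ¬ tp.2 ∈ whList ∨ s.2 > 0 then
          (if tp.1 ≠ "?" then s.1 ++ [tp.1] else s.1, s.2)
        else
          (s.1 ++ ["[MASK]"], s.2 + 1))
      ([], 0)
  let newTokens := st.1.reverse
  let newTokens := if st.2 = 0 then newTokens ++ ["[MASK]"] else newTokens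
  PySem.Str.join " " newTokens

-- ===== PORT B =====
-- tokens[len(tokens)-n:] with a nonnegative index is exactly List.drop;
-- wh_idx (None, or the loop counter, which is always ≥ 0) is Option Nat.
def process_nowh_alt (tokens : List String) (pos_tags : List String) : String :=
  let n := min tokens.length pos_tags.length
  let toks := tokens.drop (tokens.length - n)
  let poss := pos_tags.drop (pos_tags.length - n)
  let st := poss.foldl
      (fun (s : Option Nat × Nat) p =>
        (if p ∈ whList then some s.2 else s.1, s.2 + 1))
      (none, 0)
  match st.1 with
  | none => PySem.Str.join " " (toks.filter (fun t => t ≠ "?") ++ ["[MASK]"])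
  | some j =>
      PySem.Str.join " "
        ((toks.take j).filter (fun t => t ≠ "?") ++ ["[MASK]"]
          ++ (toks.drop (j + 1)).filter (fun t => t ≠ "?"))

-- ===== PRECONDITION & SPEC =====
def Spec_process_nowh (tokens : List String) (pos_tags : List String) (out : String) : Prop := out = process_nowh_alt tokens pos_tags
instance (tokens : List String) (pos_tags : List String) (out : String) : Decidable (Spec_process_nowh tokens pos_tags out) := by unfold Spec_process_nowh; infer_instance

-- ===== CLAIM (what is proved, stated in full; the proofs are below) =====
def Claim_equal_process_nowh : Prop := ∀ (tokens : List String) (pos_tags : List String), Dom_process_nowh tokens pos_tags → Spec_process_nowh tokens pos_tags (process_nowh tokens pos_tags)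

-- ===== LEMMAS AND PROOFS =====

-- A's fold step / B's fold step, named for the proofs (definitionally the literal lambdas)
def stepA (s : List String × Int) (tp : String × String) : List String × Int :=
  if ¬ tp.2 ∈ whList ∨ s.2 > 0 then
    (if tp.1 ≠ "?" then s.1 ++ [tp.1] else s.1, s.2)
  else
    (s.1 ++ ["[MASK]"], s.2 + 1)

def stepB (s : Option Nat × Nat) (p : String) : Option Nat × Nat :=
  (if p ∈ whList then some s.2 else s.1, s.2 + 1)

def filtQ (xs : List String) : List String := xs.filter (fun t => t ≠ "?")

def pvPr (p : String) : Bool := !decide (p ∈ whList)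
def pvWp (tp : String × String) : Bool := pvPr tp.2

lemma A_eq (tokens pos_tags : List String) :
    process_nowh tokens pos_tags =
      PySem.Str.join " "
        (if ((tokens.reverse.zip pos_tags.reverse).foldl stepA ([], 0)).2 = 0 then
          ((tokens.reverse.zip pos_tags.reverse).foldl stepA ([], 0)).1.reverse ++ ["[MASK]"]
         else ((tokens.reverse.zip pos_tags.reverse).foldl stepA ([], 0)).1.reverse) := rfl

lemma B_eq (tokens pos_tags : List String) :
    process_nowh_alt tokens pos_tags =
      (match (((pos_tags.drop (pos_tags.length - min tokens.length pos_tags.length)).foldl stepB (none, 0)).1 : Option Nat) with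
       | none =>
           PySem.Str.join " "
             (filtQ (tokens.drop (tokens.length - min tokens.length pos_tags.length)) ++ ["[MASK]"])
       | some j =>
           PySem.Str.join " "
             (filtQ ((tokens.drop (tokens.length - min tokens.length pos_tags.length)).take j) ++ ["[MASK]"]
               ++ filtQ ((tokens.drop (tokens.length - min tokens.length pos_tags.length)).drop (j + 1)))) := rfl

lemma foldA_pos (L : List (String × String)) :
    ∀ (acc : List String) (c : Int), 0 < c →
      L.foldl stepA (acc, c) = (acc ++ filtQ (L.map Prod.fst), c) := by
  induction L with
  | nil => intro acc c _; simp [filtQ]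
  | cons tp L ih =>
      intro acc c hc
      obtain ⟨t, p⟩ := tp
      simp only [List.foldl_cons, stepA]
      rw [if_pos (Or.inr hc)]
      by_cases ht : t = "?"
      · simp only [ht, ne_eq, not_true_eq_false, if_false]
        rw [ih acc c hc]
        simp [filtQ]
      · simp only [ne_eq, ht, not_false_eq_true, if_true]
        rw [ih (acc ++ [t]) c hc]
        simp [filtQ, ht]

lemma foldA_zero (L : List (String × String)) :
    ∀ (acc : List String),
      L.foldl stepA (acc, 0) =
        (match L.dropWhile pvWp with
         | [] => (acc ++ filtQ (L.map Prod.fst), 0)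
         | _ :: rest =>
             (acc ++ filtQ ((L.takeWhile pvWp).map Prod.fst) ++ ["[MASK]"]
                ++ filtQ (rest.map Prod.fst), 1)) := by
  induction L with
  | nil => intro acc; simp [filtQ]
  | cons tp L ih =>
      intro acc
      obtain ⟨t, p⟩ := tp
      by_cases hp : p ∈ whList
      · have hw : pvWp (t, p) = false := by simp [pvWp, pvPr, hp]
        simp only [List.foldl_cons, stepA]
        rw [if_neg (by simp [hp])]
        rw [foldA_pos L (acc ++ ["[MASK]"]) (0 + 1) (by norm_num)]
        simp [hw, filtQ]
      · have hw : pvWp (t, p) = true := by simp [pvWp, pvPr, hp]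
        simp only [List.foldl_cons, stepA]
        rw [if_pos (Or.inl hp)]
        rw [show ((if t ≠ "?" then acc ++ [t] else acc, (0 : Int))) =
             ((if t ≠ "?" then acc ++ [t] else acc), (0 : Int)) from rfl]
        rw [ih]
        rw [List.dropWhile_cons, List.takeWhile_cons]
        simp only [hw, if_true]
        cases h : L.dropWhile pvWp with
        | nil =>
            by_cases ht : t = "?" <;> simp [ht, filtQ]
        | cons hd rest =>
            by_cases ht : t = "?" <;> simp [ht, filtQ]

lemma foldB_eq (ps : List String) :
    ∀ (a : Option Nat) (i0 : Nat),
      ps.foldl stepB (a, i0) =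
        ((match ps.reverse.dropWhile pvPr with
          | [] => a
          | _ :: rest => some (i0 + rest.length)), i0 + ps.length) := by
  induction ps with
  | nil => intro a i0; simp
  | cons p ps ih =>
      intro a i0
      simp only [List.foldl_cons, stepB]
      rw [ih]
      rw [List.reverse_cons, List.dropWhile_append]
      cases h : ps.reverse.dropWhile pvPr with
      | nil =>
          by_cases hp : p ∈ whList
          · simp [pvPr, hp]
            omega
          · simp [pvPr, hp]
            omega
      | cons x rest =>
          simp only [List.isEmpty_cons, Bool.false_eq_true, if_false]
          simp
          omega

lemma filtQ_reverse (xs : List String) : filtQ xs.reverse = (filtQ xs).reverse := by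
  simp [filtQ, List.filter_reverse]

-- ===== VERDICT (by name: the statement is the Claim_ definition above) =====
theorem process_nowh_spec : Claim_equal_process_nowh := by
  intro tokens pos_tags _
  unfold Spec_process_nowh
  rw [A_eq, B_eq]
  set n := min tokens.length pos_tags.length with hn
  set toks := tokens.drop (tokens.length - n) with htoks
  set poss := pos_tags.drop (pos_tags.length - n) with hposs
  set R := tokens.reverse.zip pos_tags.reverse with hR
  have hlen1 : n ≤ tokens.length := min_le_left _ _
  have hlen2 : n ≤ pos_tags.length := min_le_right _ _
  have hzip : R = (tokens.reverse.take n).zip (pos_tags.reverse.take n) := by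
    rw [hR, List.zip_eq_zip_take_min]
    simp [hn]
  have hfst : R.map Prod.fst = toks.reverse := by
    rw [hzip, List.map_fst_zip (by simp; omega)]
    rw [List.take_reverse]
  have hsnd : R.map Prod.snd = poss.reverse := by
    rw [hzip, List.map_snd_zip (by simp; omega)]
    rw [List.take_reverse]
  have hdw : poss.reverse.dropWhile pvPr = (R.dropWhile pvWp).map Prod.snd := by
    rw [← hsnd, List.dropWhile_map]
    rfl
  rw [foldA_zero, foldB_eq]
  cases h : R.dropWhile pvWp with
  | nil =>
      simp only [hdw, h, List.map_nil]
      simp only [hfst]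
      simp [filtQ_reverse]
  | cons hd rest =>
      simp only [hdw, h, List.map_cons]
      have hsplit : R = R.takeWhile pvWp ++ hd :: rest := by
        conv_lhs => rw [← List.takeWhile_append_dropWhile (p := pvWp) (l := R), h]
      have hdecomp : toks.reverse = (R.takeWhile pvWp).map Prod.fst ++ hd.1 :: rest.map Prod.fst := by
        rw [← hfst]
        conv_lhs => rw [hsplit]
        simp
      have htoks2 : toks = (rest.map Prod.fst).reverse ++ hd.1 :: ((R.takeWhile pvWp).map Prod.fst).reverse := by
        rw [← List.reverse_reverse toks, hdecomp]
        simp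
      rw [if_neg (by norm_num)]
      have hj : (0 + (rest.map Prod.snd).length) = rest.length := by simp
      simp only [hj]
      have htake : toks.take rest.length = (rest.map Prod.fst).reverse := by
        rw [htoks2]
        rw [List.take_left' (by simp)]
      have hdrop : toks.drop (rest.length + 1) = ((R.takeWhile pvWp).map Prod.fst).reverse := by
        rw [htoks2, show ((rest.map Prod.fst).reverse ++ hd.1 :: ((R.takeWhile pvWp).map Prod.fst).reverse)
              = ((rest.map Prod.fst).reverse ++ [hd.1]) ++ ((R.takeWhile pvWp).map Prod.fst).reverse by simp]
        rw [List.drop_left' (by simp)]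
      rw [htake, hdrop, filtQ_reverse, filtQ_reverse]
      simp [List.reverse_append, filtQ]
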